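-- pv_equiv track=rewrite | github.com/npow/metaflow-serverless | src/metaflow_ephemeral/installer.py | _pick_asset
-- ===== SOURCE A (Python) =====
-- from typing import Any
--
-- def _pick_asset(
--     assets: list[dict[str, Any]],
--     os_variants: list[str],
--     arch_variants: list[str],
-- ) -> dict[str, Any] | None:
--     """
--     Select the best release asset for the current platform.
--
--     Prefers assets whose filename contains both an OS token and an arch token.
--     Falls back to OS-only matches if no arch match is found.
--     """
--     asset_lower = [(a, a["name"].lower()) for a in assets]
--
--     # Try OS + arch match first.
--     for os_token in os_variants:
--         for arch_token in arch_variants: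
--             for asset, name in asset_lower:
--                 if os_token in name and arch_token in name:
--                     # Skip .sha256, .sig, etc.
--                     if any(name.endswith(ext) for ext in (".sha256", ".sig", ".asc", ".md5")):
--                         continue
--                     return asset
--
--     # Fall back to OS-only match.
--     for os_token in os_variants:
--         for asset, name in asset_lower:
--             if os_token in name:
--                 if any(name.endswith(ext) for ext in (".sha256", ".sig", ".asc", ".md5")):
--                     continue
--                 return asset
--
--     return None
-- ===== SOURCE B (Python) =====
-- # B: single pass over the assets computing a priority key per asset
-- # (phase, os-index, arch-index, position) and keeping the lexicographic
-- # minimum, instead of A's short-circuit nested token loops.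
-- from typing import Any
--
-- _SKIP = (".sha256", ".sig", ".asc", ".md5")
--
--
-- def _first_hit(tokens: list[str], name: str) -> int | None:
--     """Index of the first token contained in name, or None."""
--     for j, t in enumerate(tokens):
--         if t in name:
--             return j
--     return None
--
--
-- def _pick_asset(
--     assets: list[dict[str, Any]],
--     os_variants: list[str],
--     arch_variants: list[str],
-- ) -> dict[str, Any] | None:
--     best_key = None
--     best_asset = None
--     for i, a in enumerate(assets):
--         name = a["name"].lower()
--         if name.endswith(_SKIP):
--             continue
--         oi = _first_hit(os_variants, name)
--         if oi is None:
--             continue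
--         ai = _first_hit(arch_variants, name)
--         key = (0, oi, ai, i) if ai is not None else (1, oi, 0, i)
--         if best_key is None or key < best_key:
--             best_key = key
--             best_asset = a
--     return best_asset
-- ===== Notes on version B (the rewrite author's own statement) =====
-- stated objective: alternative
-- what changed: Replaces A's short-circuit nested token-priority loops (os outer, arch middle, assets inner, then an os-only fallback pass) by a single pass over the assets that computes a lexicographic priority key (phase, os-index, arch-index, position) per asset and keeps the minimum.
import Mathlib
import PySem

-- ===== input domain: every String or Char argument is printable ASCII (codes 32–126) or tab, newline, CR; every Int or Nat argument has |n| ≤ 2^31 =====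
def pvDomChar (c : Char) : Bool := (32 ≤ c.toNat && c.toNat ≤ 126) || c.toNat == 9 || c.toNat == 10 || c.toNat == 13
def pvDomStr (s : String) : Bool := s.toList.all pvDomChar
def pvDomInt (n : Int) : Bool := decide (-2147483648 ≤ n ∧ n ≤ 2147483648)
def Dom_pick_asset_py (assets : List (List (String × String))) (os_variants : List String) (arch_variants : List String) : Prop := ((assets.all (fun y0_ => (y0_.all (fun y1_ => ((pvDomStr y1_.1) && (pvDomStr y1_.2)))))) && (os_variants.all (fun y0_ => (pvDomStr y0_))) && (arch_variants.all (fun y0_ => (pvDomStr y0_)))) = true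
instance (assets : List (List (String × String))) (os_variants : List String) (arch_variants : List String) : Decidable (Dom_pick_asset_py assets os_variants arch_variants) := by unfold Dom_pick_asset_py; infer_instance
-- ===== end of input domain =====

-- B replaces A's short-circuit nested token-priority loops by a single pass over the
-- assets that computes a per-asset priority key and keeps the lexicographic minimum
-- (alternative decomposition of the same selection).

-- ===== PORT A =====
-- name = a["name"].lower(): under Pre_ the key is present, .getD "" is unreachable there
def pvName (a : List (String × String)) : String :=
  PySem.Str.lower (((PySem.Dict.mk a).get? "name").getD "")

-- any(name.endswith(ext) for ext in (".sha256", ".sig", ".asc", ".md5"))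
def pvSkip (name : String) : Bool :=
  [".sha256", ".sig", ".asc", ".md5"].any (fun ext => PySem.Str.endswith name ext)

def pick_asset_py (assets : List (List (String × String))) (os_variants : List String) (arch_variants : List String) : Option (List (String × String)) :=
  let asset_lower := assets.map (fun a => (a, pvName a))
  match os_variants.findSome? (fun os_token =>
      arch_variants.findSome? (fun arch_token =>
        asset_lower.findSome? (fun p =>
          if PySem.Str.isIn os_token p.2 && PySem.Str.isIn arch_token p.2 then
            if pvSkip p.2 then none else some p.1
          else none))) with
  | some a => some a
  | none =>
      os_variants.findSome? (fun os_token =>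
        asset_lower.findSome? (fun p =>
          if PySem.Str.isIn os_token p.2 then
            if pvSkip p.2 then none else some p.1
          else none))

-- ===== PORT B =====
-- _first_hit(tokens, name): index of first token contained in name (loop with counter j)
def pvFirstHitAux (name : String) : Nat → List String → Option Nat
  | _, [] => none
  | j, t :: ts => if PySem.Str.isIn t name then some j else pvFirstHitAux name (j + 1) ts

def pvFirstHit (tokens : List String) (name : String) : Option Nat :=
  pvFirstHitAux name 0 tokens

-- Python tuple '<' on the 4-tuples Source B compares
def pvKeyLt (k k' : Nat × Nat × Nat × Nat) : Bool :=
  decide (k.1 < k'.1) || (k.1 == k'.1 && (decide (k.2.1 < k'.2.1) || (k.2.1 == k'.2.1 &&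
    (decide (k.2.2.1 < k'.2.2.1) || (k.2.2.1 == k'.2.2.1 && decide (k.2.2.2 < k'.2.2.2))))))

-- the 'for i, a in enumerate(assets)' loop of Source B, carrying (best_key, best_asset)
def pvBestAux (osv archv : List String) : Nat → Option ((Nat × Nat × Nat × Nat) × List (String × String)) → List (List (String × String)) → Option ((Nat × Nat × Nat × Nat) × List (String × String))
  | _, best, [] => best
  | i, best, a :: rest =>
    let name := pvName a
    let best' :=
      if pvSkip name then best
      else
        match pvFirstHit osv name with
        | none => best
        | some oi =>
          let key : Nat × Nat × Nat × Nat :=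
            match pvFirstHit archv name with
            | some ai => (0, oi, ai, i)
            | none => (1, oi, 0, i)
          match best with
          | none => some (key, a)
          | some (bk, ba) => if pvKeyLt key bk then some (key, a) else some (bk, ba)
    pvBestAux osv archv (i + 1) best' rest

def pick_asset_py_alt (assets : List (List (String × String))) (os_variants : List String) (arch_variants : List String) : Option (List (String × String)) :=
  (pvBestAux os_variants arch_variants 0 none assets).map (fun q => q.2)

-- ===== PRECONDITION & SPEC =====
-- Pre_ excludes exactly the inputs where some asset dict has no "name" key: there
-- a["name"] raises KeyError in A (and in B alike).
def Pre_pick_asset_py (assets : List (List (String × String))) (os_variants : List String) (arch_variants : List String) : Prop :=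
  ∀ a ∈ assets, ((PySem.Dict.mk a).get? "name").isSome = true

instance (assets : List (List (String × String))) (os_variants : List String) (arch_variants : List String) : Decidable (Pre_pick_asset_py assets os_variants arch_variants) := by
  unfold Pre_pick_asset_py; infer_instance

def pvWitness_pick_asset_py : (List (List (String × String))) × List String × List String :=
  ([[("name", "metaflow-linux-amd64.zip")]], ["linux"], ["amd64"])

def Spec_pick_asset_py (assets : List (List (String × String))) (os_variants : List String) (arch_variants : List String) (out : Option (List (String × String))) : Prop := out = pick_asset_py_alt assets os_variants arch_variants
instance (assets : List (List (String × String))) (os_variants : List String) (arch_variants : List String) (out : Option (List (String × String))) : Decidable (Spec_pick_asset_py assets os_variants arch_variants out) := by unfold Spec_pick_asset_py; infer_instance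

-- ===== CLAIM (what is proved, stated in full; the proofs are below) =====
def Claim_equal_pick_asset_py : Prop := ∀ (assets : List (List (String × String))) (os_variants : List String) (arch_variants : List String), Dom_pick_asset_py assets os_variants arch_variants → Pre_pick_asset_py assets os_variants arch_variants → Spec_pick_asset_py assets os_variants arch_variants (pick_asset_py assets os_variants arch_variants)

-- ===== LEMMAS AND PROOFS =====

-- ---- proof-side vocabulary ----

-- combined token list A scans: all (os, arch) pairs in priority order, then all os tokens
def pvHit (t : (String × String) ⊕ String) (name : String) : Bool :=
  match t with
  | Sum.inl (o, r) => PySem.Str.isIn o name && PySem.Str.isIn r name && !pvSkip name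
  | Sum.inr o => PySem.Str.isIn o name && !pvSkip name

def pvT (osv archv : List String) : List ((String × String) ⊕ String) :=
  (osv.flatMap (fun o => archv.map (fun r => Sum.inl (o, r)))) ++ osv.map Sum.inr

-- position (in pvT) of the first token a name matches
def pvKT (osv archv : List String) (name : String) : Option Nat :=
  (pvT osv archv).findIdx? (fun t => pvHit t name)

-- first minimum over Option-Nat keys (A's selection, keep-first on ties)
def pvAmO : List (Option Nat × (List (String × String) × String)) → Option (Nat × (List (String × String) × String))
  | [] => none
  | (none, _) :: l => pvAmO l
  | (some c, p) :: l =>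
    match pvAmO l with
    | none => some (c, p)
    | some (c', p') => if c ≤ c' then some (c, p) else some (c', p')

-- first minimum over 4-tuple keys (B's selection)
def pvAmK : List ((Nat × Nat × Nat × Nat) × List (String × String)) → Option ((Nat × Nat × Nat × Nat) × List (String × String))
  | [] => none
  | (k, a) :: l =>
    match pvAmK l with
    | none => some (k, a)
    | some (k', a') => if pvKeyLt k' k then some (k', a') else some (k, a)

def pvCombine (b m : Option ((Nat × Nat × Nat × Nat) × List (String × String))) : Option ((Nat × Nat × Nat × Nat) × List (String × String)) :=
  match b, m with
  | none, m => m
  | some b, none => some b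
  | some b, some m => if pvKeyLt m.1 b.1 then some m else some b

-- the key Source B's loop body computes for asset a at position i (none = asset skipped)
def pvKeyOf (osv archv : List String) (i : Nat) (a : List (String × String)) : Option (Nat × Nat × Nat × Nat) :=
  let name := pvName a
  if pvSkip name then none
  else
    match pvFirstHit osv name with
    | none => none
    | some oi =>
      some (match pvFirstHit archv name with
        | some ai => (0, oi, ai, i)
        | none => (1, oi, 0, i))

def pvKeyed (osv archv : List String) : Nat → List (List (String × String)) → List ((Nat × Nat × Nat × Nat) × List (String × String))
  | _, [] => []
  | i, a :: rest =>
    match pvKeyOf osv archv i a with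
    | none => pvKeyed osv archv (i + 1) rest
    | some k => (k, a) :: pvKeyed osv archv (i + 1) rest

def pvEnc (osv archv : List String) (k : Nat × Nat × Nat × Nat) : Nat :=
  if k.1 = 0 then k.2.1 * archv.length + k.2.2.1 else osv.length * archv.length + k.2.1

def pvValid (osv archv : List String) (k : Nat × Nat × Nat × Nat) : Prop :=
  (k.1 = 0 ∧ k.2.1 < osv.length ∧ k.2.2.1 < archv.length) ∨
  (k.1 = 1 ∧ k.2.1 < osv.length ∧ k.2.2.1 = 0)

def pvRel (osv archv : List String) (i : Nat) :
    Option (Nat × (List (String × String) × String)) → Option ((Nat × Nat × Nat × Nat) × List (String × String)) → Prop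
  | none, none => True
  | some q, some e => q.2.1 = e.2 ∧ pvEnc osv archv e.1 = q.1 ∧ i ≤ e.1.2.2.2 ∧ pvValid osv archv e.1
  | _, _ => False

-- ---- generic list lemmas ----

theorem pv_fi_bound {α : Type} (p : α → Bool) (l : List α) (j : Nat) (h : l.findIdx? p = some j) : j < l.length := by
  induction l generalizing j with
  | nil => simp at h
  | cons x xs ih =>
    rw [List.findIdx?_cons] at h
    by_cases hx : p x
    · simp [hx] at h; simp; omega
    · simp [hx] at h
      obtain ⟨j', hj', rfl⟩ := h
      have := ih _ hj'
      simp; omega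

theorem pv_fs_guard {α : Type} (q : α → Bool) (l : List α) :
    l.findSome? (fun p => if q p then some p else none) = l.find? q := by
  induction l with
  | nil => rfl
  | cons x xs ih =>
    rw [List.findSome?_cons, List.find?_cons]
    by_cases hx : q x <;> simp [hx, ih]

theorem pv_fs_mapOpt {α β γ : Type} (g : α → Option β) (f : β → γ) (l : List α) :
    l.findSome? (fun x => (g x).map f) = (l.findSome? g).map f := by
  induction l with
  | nil => rfl
  | cons x xs ih =>
    rw [List.findSome?_cons, List.findSome?_cons]
    cases g x <;> simp [ih]

theorem pv_fs_flatMap {α β γ : Type} (f : α → List β) (g : β → Option γ) (l : List α) :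
    (l.flatMap f).findSome? g = l.findSome? (fun x => (f x).findSome? g) := by
  induction l with
  | nil => rfl
  | cons x xs ih =>
    rw [List.flatMap_cons, List.findSome?_append, List.findSome?_cons]
    cases (f x).findSome? g <;> simp [ih, Option.or]

-- ---- pvAmO facts ----

theorem pv_amO_map_none {α : Type} (f : α → List (String × String) × String) (l : List α) :
    pvAmO (l.map (fun a => ((none : Option Nat), f a))) = none := by
  induction l with
  | nil => rfl
  | cons x xs ih => simpa [pvAmO] using ih

theorem pv_amO_shift (l : List (Option Nat × (List (String × String) × String))) :
    pvAmO (l.map (fun q => (q.1.map (· + 1), q.2))) = (pvAmO l).map (fun q => (q.1 + 1, q.2)) := by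
  induction l with
  | nil => rfl
  | cons q l ih =>
    obtain ⟨k, p⟩ := q
    cases k with
    | none => simpa [pvAmO] using ih
    | some c =>
      simp only [List.map_cons, Option.map_some, pvAmO, ih]
      cases pvAmO l with
      | none => rfl
      | some q' => by_cases hc : c ≤ q'.1 <;> simp [hc, Option.map]

theorem pv_amO_zero (l : List (Option Nat × (List (String × String) × String)))
    (h : ∃ q ∈ l, q.1 = some 0) :
    pvAmO l = (l.find? (fun q => q.1 == some 0)).map (fun q => (0, q.2)) := by
  induction l with
  | nil => simp at h
  | cons q l ih =>
    obtain ⟨kq, pq⟩ := q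
    cases kq with
    | none =>
      have h' : ∃ q ∈ l, q.1 = some 0 := by
        rcases h with ⟨q', hq', h0⟩
        rcases List.mem_cons.mp hq' with rfl | hm
        · simp at h0
        · exact ⟨q', hm, h0⟩
      simp only [pvAmO, List.find?_cons]
      simpa using ih h'
    | some c =>
      rcases Nat.eq_zero_or_pos c with rfl | hcpos
      · simp only [pvAmO, List.find?_cons]
        cases hAl : pvAmO l with
        | none => simp
        | some q' => simp
      · have h' : ∃ q ∈ l, q.1 = some 0 := by
          rcases h with ⟨q', hq', h0⟩
          rcases List.mem_cons.mp hq' with rfl | hm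
          · simp at h0; omega
          · exact ⟨q', hm, h0⟩
        have hfind : (l.find? (fun q => q.1 == some 0)).isSome := by
          rcases h' with ⟨q', hq', h0⟩
          exact List.find?_isSome.mpr ⟨q', hq', by simp [h0]⟩
        obtain ⟨q0, hq0⟩ := Option.isSome_iff_exists.mp hfind
        have hq00 : q0.1 = some 0 := by
          have := List.find?_some hq0
          simpa using this
        have hne : ((some c : Option Nat) == some 0) = false := by
          simp only [beq_eq_false_iff_ne, ne_eq, Option.some.injEq]
          omega
        simp only [pvAmO, ih h', hq0, List.find?_cons, hne, Option.map_some]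
        simp [show ¬ c ≤ 0 by omega]

-- ---- core: A's nested first-match scan = first minimum of first-token-position keys ----

theorem pv_L1 (toks : List ((String × String) ⊕ String)) (hit : ((String × String) ⊕ String) → (List (String × String) × String) → Bool)
    (items : List (List (String × String) × String)) :
    toks.findSome? (fun t => items.findSome? (fun p => if hit t p then some p else none))
      = (pvAmO (items.map (fun p => (toks.findIdx? (fun t => hit t p), p)))).map (fun q => q.2) := by
  induction toks with
  | nil =>
    have h := pv_amO_map_none (fun p => p) items
    simp only [List.findSome?_nil, List.findIdx?_nil]
    simp [h]
  | cons t ts ih =>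
    rw [List.findSome?_cons, pv_fs_guard]
    cases hfind : items.find? (fun p => hit t p) with
    | some a0 =>
      have hmem := List.mem_of_find?_eq_some hfind
      have hhit : hit t a0 = true := List.find?_some hfind
      have hex : ∃ q ∈ items.map (fun p => ((t :: ts).findIdx? (fun tk => hit tk p), p)), q.1 = some 0 := by
        refine ⟨_, List.mem_map_of_mem hmem, ?_⟩
        simp [List.findIdx?_cons, hhit]
      rw [pv_amO_zero _ hex, List.find?_map]
      have hpred : ((fun (q : Option Nat × (List (String × String) × String)) => q.1 == some 0) ∘
          (fun p => ((t :: ts).findIdx? (fun tk => hit tk p), p))) = fun p => hit t p := by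
        funext p
        by_cases hh : hit t p
        · simp [List.findIdx?_cons, hh]
        · simp only [Function.comp, List.findIdx?_cons, hh, Bool.false_eq_true, if_false]
          cases ts.findIdx? (fun tk => hit tk p) <;> simp
      rw [hpred, hfind]
      simp
    | none =>
      have hnone : ∀ p ∈ items, ¬ hit t p := List.find?_eq_none.mp hfind
      have hmapeq : items.map (fun p => ((t :: ts).findIdx? (fun tk => hit tk p), p))
          = (items.map (fun p => (ts.findIdx? (fun tk => hit tk p), p))).map (fun q => (q.1.map (· + 1), q.2)) := by
        rw [List.map_map]
        apply List.map_congr_left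
        intro p hp
        simp [List.findIdx?_cons, hnone p hp]
      rw [hmapeq, pv_amO_shift, ih]
      cases pvAmO (items.map (fun p => (ts.findIdx? (fun tk => hit tk p), p))) <;> rfl

-- A's port as a single scan over the combined token list
theorem pv_A1 (assets : List (List (String × String))) (osv archv : List String) :
    pick_asset_py assets osv archv
      = ((pvT osv archv).findSome? (fun t =>
          (assets.map (fun a => (a, pvName a))).findSome? (fun p => if pvHit t p.2 then some p else none))).map (fun q => q.1) := by
  have hfun0 : ∀ (o r : String), (fun (p : List (String × String) × String) =>
        if PySem.Str.isIn o p.2 && PySem.Str.isIn r p.2 then (if pvSkip p.2 then none else some p.1) else none)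
      = fun p => (if pvHit (Sum.inl (o, r)) p.2 then some p else none).map (fun q => q.1) := by
    intro o r
    funext p
    cases hA : PySem.Str.isIn o p.2 <;> cases hB : PySem.Str.isIn r p.2 <;>
      cases hS : pvSkip p.2 <;> simp only [pvHit, hA, hB, hS] <;> simp
  have hfun1 : ∀ (o : String), (fun (p : List (String × String) × String) =>
        if PySem.Str.isIn o p.2 then (if pvSkip p.2 then none else some p.1) else none)
      = fun p => (if pvHit (Sum.inr o) p.2 then some p else none).map (fun q => q.1) := by
    intro o
    funext p
    cases hA : PySem.Str.isIn o p.2 <;> cases hS : pvSkip p.2 <;> simp only [pvHit, hA, hS] <;> simp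
  simp only [pick_asset_py, pvT, List.findSome?_append]
  rw [pv_fs_flatMap]
  simp only [List.findSome?_map, Function.comp_def, hfun0, hfun1, pv_fs_mapOpt]
  generalize (List.findSome? (fun x => List.findSome? (fun x_1 => List.findSome?
      (fun x_2 => if pvHit (Sum.inl (x, x_1)) (pvName x_2) = true then some (x_2, pvName x_2) else none)
      assets) archv) osv) = X
  cases X <;> rfl

theorem pv_A2 (assets : List (List (String × String))) (osv archv : List String) :
    pick_asset_py assets osv archv
      = (pvAmO (assets.map (fun a => (pvKT osv archv (pvName a), (a, pvName a))))).map (fun q => q.2.1) := by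
  rw [pv_A1, pv_L1, Option.map_map, List.map_map]
  rfl

-- ---- key correspondence ----

theorem pv_firstHitAux_eq (name : String) (j : Nat) (ts : List String) :
    pvFirstHitAux name j ts = (ts.findIdx? (fun t => PySem.Str.isIn t name)).map (j + ·) := by
  induction ts generalizing j with
  | nil => rfl
  | cons t ts ih =>
    rw [List.findIdx?_cons]
    show (if PySem.Str.isIn t name then some j else pvFirstHitAux name (j + 1) ts) = _
    by_cases hx : PySem.Str.isIn t name = true
    · rw [if_pos hx, if_pos hx]
      simp
    · rw [if_neg hx, if_neg hx, ih (j + 1)]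
      cases ts.findIdx? (fun t => PySem.Str.isIn t name) with
      | none => rfl
      | some x => simp; omega


theorem pv_firstHit_eq (tokens : List String) (name : String) :
    pvFirstHit tokens name = tokens.findIdx? (fun t => PySem.Str.isIn t name) := by
  rw [pvFirstHit, pv_firstHitAux_eq]
  cases tokens.findIdx? (fun t => PySem.Str.isIn t name) <;> simp

theorem pv_skip_none (name : String) (h : pvSkip name = true) (l : List ((String × String) ⊕ String)) :
    l.findIdx? (fun t => pvHit t name) = none := by
  induction l with
  | nil => simp
  | cons t l ih =>
    rw [List.findIdx?_cons]
    have ht : pvHit t name = false := by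
      cases t with
      | inl pr => obtain ⟨o, r⟩ := pr; simp [pvHit, h]
      | inr o => simp [pvHit, h]
    simp [ht, ih]

theorem pv_prod_idx (osv archv : List String) (name : String) (h : pvSkip name = false) :
    (osv.flatMap (fun o => archv.map (fun r => Sum.inl (o, r)))).findIdx? (fun t => pvHit t name)
      = match osv.findIdx? (fun o => PySem.Str.isIn o name), archv.findIdx? (fun r => PySem.Str.isIn r name) with
        | some oi, some ai => some (oi * archv.length + ai)
        | _, _ => none := by
  induction osv with
  | nil =>
    cases archv.findIdx? (fun r => PySem.Str.isIn r name) <;> simp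
  | cons o os ih =>
    rw [List.flatMap_cons, List.findIdx?_append, List.findIdx?_map, List.findIdx?_cons]
    have hcomp : ((fun t => pvHit t name) ∘ (fun r => Sum.inl (o, r)))
        = fun r => PySem.Str.isIn o name && PySem.Str.isIn r name := by
      funext r
      show pvHit (Sum.inl (o, r)) name = _
      simp only [pvHit, h, Bool.not_false, Bool.and_true]
    rw [hcomp]
    cases ho : PySem.Str.isIn o name with
    | true =>
      simp only [Bool.true_and]
      rw [if_pos trivial]
      cases ha : archv.findIdx? (fun r => PySem.Str.isIn r name) with
      | some ai => simp [Option.or]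
      | none =>
        rw [ih, ha]
        cases hos : os.findIdx? (fun o => PySem.Str.isIn o name) <;> simp [Option.or]
    | false =>
      simp only [Bool.false_and]
      rw [if_neg (by simp : ¬(false = true))]
      have hnone : archv.findIdx? (fun _ => false) = none := by
        induction archv <;> simp [List.findIdx?_cons, *]
      rw [hnone, ih]
      cases hos : os.findIdx? (fun o => PySem.Str.isIn o name) with
      | none => cases ha : archv.findIdx? (fun r => PySem.Str.isIn r name) <;> simp [Option.or]
      | some oi =>
        cases ha : archv.findIdx? (fun r => PySem.Str.isIn r name) with
        | none => simp [Option.or]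
        | some ai =>
          simp [Option.or]
          ring


theorem pv_keyOf_none (osv archv : List String) (i : Nat) (a : List (String × String))
    (h : pvKeyOf osv archv i a = none) : pvKT osv archv (pvName a) = none := by
  rw [pvKT, pvT, List.findIdx?_append]
  cases hs : pvSkip (pvName a) with
  | true =>
    rw [pv_skip_none _ hs, pv_skip_none _ hs]
    rfl
  | false =>
    rw [pvKeyOf] at h
    simp only [hs, Bool.false_eq_true, if_false] at h
    cases ho : pvFirstHit osv (pvName a) with
    | some oi => rw [ho] at h; simp at h
    | none =>
      have hosN : osv.findIdx? (fun o => PySem.Str.isIn o (pvName a)) = none := by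
        rw [← pv_firstHit_eq]; exact ho
      rw [pv_prod_idx _ _ _ hs, hosN]
      have h2 : (osv.map Sum.inr).findIdx? (fun t => pvHit t (pvName a)) = none := by
        rw [List.findIdx?_map]
        have hc : ((fun t => pvHit t (pvName a)) ∘ Sum.inr)
            = fun o => PySem.Str.isIn o (pvName a) := by
          funext o
          show pvHit (Sum.inr o) (pvName a) = _
          simp only [pvHit, hs, Bool.not_false, Bool.and_true]
        rw [hc]; exact hosN
      rw [h2]
      cases archv.findIdx? (fun r => PySem.Str.isIn r (pvName a)) <;> rfl

theorem pv_keyOf_some (osv archv : List String) (i : Nat) (a : List (String × String)) (k : Nat × Nat × Nat × Nat)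
    (h : pvKeyOf osv archv i a = some k) :
    pvKT osv archv (pvName a) = some (pvEnc osv archv k) ∧ pvValid osv archv k ∧ k.2.2.2 = i := by
  cases hs : pvSkip (pvName a) with
  | true => rw [pvKeyOf] at h; simp [hs] at h
  | false =>
    rw [pvKeyOf] at h
    simp only [hs, Bool.false_eq_true, if_false] at h
    cases ho : pvFirstHit osv (pvName a) with
    | none => rw [ho] at h; simp at h
    | some oi =>
      rw [ho] at h
      simp only [Option.some.injEq] at h
      have hosI : osv.findIdx? (fun o => PySem.Str.isIn o (pvName a)) = some oi := by
        rw [← pv_firstHit_eq]; exact ho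
      have hoLT : oi < osv.length := pv_fi_bound _ _ _ hosI
      have hlen : (osv.flatMap (fun o => archv.map (fun r => (Sum.inl (o, r) : (String × String) ⊕ String)))).length
          = osv.length * archv.length := by
        rw [List.length_flatMap]
        simp
      have h2c : ((fun t => pvHit t (pvName a)) ∘ Sum.inr)
          = fun o => PySem.Str.isIn o (pvName a) := by
        funext o
        show pvHit (Sum.inr o) (pvName a) = _
        simp only [pvHit, hs, Bool.not_false, Bool.and_true]
      cases ha : pvFirstHit archv (pvName a) with
      | some ai =>
        rw [ha] at h
        have harI : archv.findIdx? (fun r => PySem.Str.isIn r (pvName a)) = some ai := by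
          rw [← pv_firstHit_eq]; exact ha
        have haLT : ai < archv.length := pv_fi_bound _ _ _ harI
        subst h
        refine ⟨?_, Or.inl ⟨rfl, hoLT, haLT⟩, rfl⟩
        rw [pvKT, pvT, List.findIdx?_append, pv_prod_idx _ _ _ hs, hosI, harI]
        simp [pvEnc, Option.or]
      | none =>
        rw [ha] at h
        have harN : archv.findIdx? (fun r => PySem.Str.isIn r (pvName a)) = none := by
          rw [← pv_firstHit_eq]; exact ha
        subst h
        refine ⟨?_, Or.inr ⟨rfl, hoLT, rfl⟩, rfl⟩
        rw [pvKT, pvT, List.findIdx?_append, pv_prod_idx _ _ _ hs, hosI, harN,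
          List.findIdx?_map, h2c, hosI]
        simp [pvEnc, hlen, Option.or, Nat.add_comm]


-- ---- order correspondence ----

theorem pv_keyLt_iff (k k' : Nat × Nat × Nat × Nat) :
    pvKeyLt k k' = true ↔ (k.1 < k'.1 ∨ (k.1 = k'.1 ∧ (k.2.1 < k'.2.1 ∨ (k.2.1 = k'.2.1 ∧
      (k.2.2.1 < k'.2.2.1 ∨ (k.2.2.1 = k'.2.2.1 ∧ k.2.2.2 < k'.2.2.2)))))) := by
  simp [pvKeyLt]

theorem pv_keyLt_trans (a b c : Nat × Nat × Nat × Nat) (h1 : pvKeyLt a b = true) (h2 : pvKeyLt b c = true) :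
    pvKeyLt a c = true := by
  rw [pv_keyLt_iff] at h1 h2 ⊢
  omega

theorem pv_keyLt_neg_trans (a b c : Nat × Nat × Nat × Nat) (h1 : pvKeyLt a b = false) (h2 : pvKeyLt b c = false) :
    pvKeyLt a c = false := by
  rw [← Bool.not_eq_true] at h1 h2 ⊢
  rw [pv_keyLt_iff] at h1 h2 ⊢
  omega

theorem pv_mul_step (LA oi oi' : Nat) (h : oi < oi') : oi * LA + LA ≤ oi' * LA := by
  have h2 : (oi + 1) * LA ≤ oi' * LA := Nat.mul_le_mul_right LA h
  calc oi * LA + LA = (oi + 1) * LA := by ring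
  _ ≤ oi' * LA := h2

theorem pv_mulLex (LA oi ai oi' ai' : Nat) (h : ai < LA) (h' : ai' < LA) :
    oi * LA + ai < oi' * LA + ai' ↔ oi < oi' ∨ (oi = oi' ∧ ai < ai') := by
  constructor
  · intro hlt
    rcases Nat.lt_trichotomy oi oi' with hc | hc | hc
    · exact Or.inl hc
    · refine Or.inr ⟨hc, ?_⟩
      subst hc
      exact Nat.lt_of_add_lt_add_left hlt
    · exfalso
      have h2 := pv_mul_step LA oi' oi hc
      generalize hX : oi * LA = X at hlt h2
      generalize hY : oi' * LA = Y at hlt h2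
      omega
  · intro hor
    rcases hor with hc | ⟨rfl, hc⟩
    · have h2 := pv_mul_step LA oi oi' hc
      generalize hX : oi * LA = X at h2 ⊢
      generalize hY : oi' * LA = Y at h2 ⊢
      omega
    · exact Nat.add_lt_add_left hc _

theorem pv_C2 (osv archv : List String) (k k' : Nat × Nat × Nat × Nat)
    (hv : pvValid osv archv k) (hv' : pvValid osv archv k') (hi : k.2.2.2 < k'.2.2.2) :
    pvKeyLt k' k = decide (pvEnc osv archv k' < pvEnc osv archv k) := by
  obtain ⟨k1, k2, k3, k4⟩ := k
  obtain ⟨l1, l2, l3, l4⟩ := k'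
  simp only [pvValid] at hv hv'
  simp only at hi
  rw [Bool.eq_iff_iff, pv_keyLt_iff, decide_eq_true_eq]
  rcases hv with ⟨h0, ho, ha⟩ | ⟨h0, ho, ha⟩ <;> rcases hv' with ⟨h0', ho', ha'⟩ | ⟨h0', ho', ha'⟩ <;>
    subst h0 <;> subst h0' <;> simp only [pvEnc] <;> try norm_num
  · rw [pv_mulLex archv.length l2 l3 k2 k3 ha' ha]
    omega
  · have hb : k2 * archv.length + k3 < osv.length * archv.length := by
      have h2 := pv_mul_step archv.length k2 osv.length ho
      generalize hX : k2 * archv.length = X at h2 ⊢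
      generalize hY : osv.length * archv.length = Y at h2 ⊢
      omega
    generalize hX : k2 * archv.length = X at hb ⊢
    generalize hY : osv.length * archv.length = Y at hb ⊢
    omega
  · have hb : l2 * archv.length + l3 < osv.length * archv.length := by
      have h2 := pv_mul_step archv.length l2 osv.length ho'
      generalize hX : l2 * archv.length = X at h2 ⊢
      generalize hY : osv.length * archv.length = Y at h2 ⊢
      omega
    generalize hX : l2 * archv.length = X at hb ⊢
    generalize hY : osv.length * archv.length = Y at hb ⊢
    omega
  · generalize hY : osv.length * archv.length = Y
    omega


-- ---- B's fold = first minimum over the keyed list ----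

theorem pv_step_min (k : Nat × Nat × Nat × Nat) (a : List (String × String))
    (best : Option ((Nat × Nat × Nat × Nat) × List (String × String)))
    (m : List ((Nat × Nat × Nat × Nat) × List (String × String))) :
    pvCombine (match best with
      | none => some (k, a)
      | some (bk, ba) => if pvKeyLt k bk = true then some (k, a) else some (bk, ba)) (pvAmK m)
    = pvCombine best (pvAmK ((k, a) :: m)) := by
  cases best with
  | none =>
    simp only [pvAmK]
    cases hA : pvAmK m with
    | none => rfl
    | some e =>
      obtain ⟨k', a'⟩ := e
      simp [pvCombine]
  | some b =>
    obtain ⟨bk, ba⟩ := b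
    simp only [pvAmK]
    cases hA : pvAmK m with
    | none =>
      cases h1 : pvKeyLt k bk <;> simp [pvCombine, h1]
    | some e =>
      obtain ⟨k', a'⟩ := e
      cases h1 : pvKeyLt k bk with
      | true =>
        cases h2 : pvKeyLt k' k with
        | true =>
          have h3 : pvKeyLt k' bk = true := pv_keyLt_trans _ _ _ h2 h1
          simp [pvCombine, h2, h3]
        | false => simp [pvCombine, h1, h2]
      | false =>
        cases h2 : pvKeyLt k' k with
        | true => simp [pvCombine, h2]
        | false =>
          have h3 : pvKeyLt k' bk = false := pv_keyLt_neg_trans _ _ _ h2 h1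
          simp [pvCombine, h1, h2, h3]

theorem pv_B1 (osv archv : List String) (l : List (List (String × String))) :
    ∀ (i : Nat) (best : Option ((Nat × Nat × Nat × Nat) × List (String × String))),
    pvBestAux osv archv i best l = pvCombine best (pvAmK (pvKeyed osv archv i l)) := by
  induction l with
  | nil =>
    intro i best
    cases best <;> rfl
  | cons a rest ih =>
    intro i best
    cases hs : pvSkip (pvName a) with
    | true =>
      have hkd : pvKeyed osv archv i (a :: rest) = pvKeyed osv archv (i + 1) rest := by
        simp [pvKeyed, pvKeyOf, hs]
      simp only [pvBestAux, hs, if_true]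
      rw [ih, hkd]
    | false =>
      cases ho : pvFirstHit osv (pvName a) with
      | none =>
        have hkd : pvKeyed osv archv i (a :: rest) = pvKeyed osv archv (i + 1) rest := by
          simp [pvKeyed, pvKeyOf, hs, ho]
        simp only [pvBestAux, hs, Bool.false_eq_true, if_false, ho]
        rw [ih, hkd]
      | some oi =>
        cases ha : pvFirstHit archv (pvName a) with
        | some ai =>
          have hkd : pvKeyed osv archv i (a :: rest) = ((0, oi, ai, i), a) :: pvKeyed osv archv (i + 1) rest := by
            simp [pvKeyed, pvKeyOf, hs, ho, ha]
          simp only [pvBestAux, hs, Bool.false_eq_true, if_false, ho, ha]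
          rw [ih, hkd]
          exact pv_step_min _ _ best _
        | none =>
          have hkd : pvKeyed osv archv i (a :: rest) = ((1, oi, 0, i), a) :: pvKeyed osv archv (i + 1) rest := by
            simp [pvKeyed, pvKeyOf, hs, ho, ha]
          simp only [pvBestAux, hs, Bool.false_eq_true, if_false, ho, ha]
          rw [ih, hkd]
          exact pv_step_min _ _ best _


theorem pv_B2 (assets : List (List (String × String))) (osv archv : List String) :
    pick_asset_py_alt assets osv archv = (pvAmK (pvKeyed osv archv 0 assets)).map (fun q => q.2) := by
  rw [pick_asset_py_alt, pv_B1]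
  rfl


-- ---- the bridge: both selections pick the same asset ----

theorem pv_rel_mono (osv archv : List String) (i j : Nat) (hij : i ≤ j)
    (x : Option (Nat × (List (String × String) × String)))
    (y : Option ((Nat × Nat × Nat × Nat) × List (String × String)))
    (h : pvRel osv archv j x y) : pvRel osv archv i x y := by
  cases x with
  | none =>
    cases y with
    | none => trivial
    | some e => exact h.elim
  | some q =>
    cases y with
    | none => exact h.elim
    | some e =>
      obtain ⟨h1, h2, h3, h4⟩ := h
      exact ⟨h1, h2, Nat.le_trans hij h3, h4⟩

theorem pv_MAIN (osv archv : List String) (l : List (List (String × String))) :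
    ∀ (i : Nat), pvRel osv archv i
      (pvAmO (l.map (fun a => (pvKT osv archv (pvName a), (a, pvName a)))))
      (pvAmK (pvKeyed osv archv i l)) := by
  induction l with
  | nil => intro i; trivial
  | cons a rest ih =>
    intro i
    cases hk : pvKeyOf osv archv i a with
    | none =>
      have hKT := pv_keyOf_none _ _ _ _ hk
      have hkd : pvKeyed osv archv i (a :: rest) = pvKeyed osv archv (i + 1) rest := by
        simp [pvKeyed, hk]
      rw [List.map_cons, hKT, hkd]
      show pvRel osv archv i (pvAmO _) _
      rw [show pvAmO ((none, (a, pvName a)) :: rest.map (fun a => (pvKT osv archv (pvName a), (a, pvName a))))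
          = pvAmO (rest.map (fun a => (pvKT osv archv (pvName a), (a, pvName a)))) from rfl]
      exact pv_rel_mono _ _ i (i + 1) (Nat.le_succ i) _ _ (ih (i + 1))
    | some k =>
      obtain ⟨hKT, hval, hidx⟩ := pv_keyOf_some _ _ _ _ _ hk
      have hkd : pvKeyed osv archv i (a :: rest) = (k, a) :: pvKeyed osv archv (i + 1) rest := by
        simp [pvKeyed, hk]
      rw [List.map_cons, hKT, hkd]
      have ih' := ih (i + 1)
      simp only [pvAmO, pvAmK]
      cases hA : pvAmO (rest.map (fun a => (pvKT osv archv (pvName a), (a, pvName a)))) with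
      | none =>
        cases hB : pvAmK (pvKeyed osv archv (i + 1) rest) with
        | none => exact ⟨rfl, rfl, by show i ≤ k.2.2.2; omega, hval⟩
        | some e => rw [hA, hB] at ih'; exact ih'.elim
      | some q' =>
        obtain ⟨c', p'⟩ := q'
        cases hB : pvAmK (pvKeyed osv archv (i + 1) rest) with
        | none => rw [hA, hB] at ih'; exact ih'.elim
        | some e' =>
          obtain ⟨e1, e2⟩ := e'
          rw [hA, hB] at ih'
          obtain ⟨h1, h2, h3, h4⟩ := ih'
          simp only at h1 h2 h3
          have hord : pvKeyLt e1 k = decide (pvEnc osv archv e1 < pvEnc osv archv k) :=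
            pv_C2 osv archv k e1 hval h4 (by show k.2.2.2 < e1.2.2.2; omega)
          show pvRel osv archv i
            (if pvEnc osv archv k ≤ c' then some (pvEnc osv archv k, a, pvName a) else some (c', p'))
            (if pvKeyLt e1 k = true then some (e1, e2) else some (k, a))
          by_cases hle : pvEnc osv archv k ≤ c'
          · rw [if_pos hle]
            have hlt : pvKeyLt e1 k = false := by
              rw [hord]
              simp only [decide_eq_false_iff_not]
              omega
            rw [hlt]
            simp only [Bool.false_eq_true, if_false]
            exact ⟨rfl, rfl, by show i ≤ k.2.2.2; omega, hval⟩
          · rw [if_neg hle]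
            have hlt : pvKeyLt e1 k = true := by
              rw [hord]
              simp only [decide_eq_true_eq]
              omega
            rw [hlt]
            simp only [if_true]
            exact ⟨h1, h2, by show i ≤ e1.2.2.2; omega, h4⟩


-- ===== VERDICT (by name: the statement is the Claim_ definition above) =====
theorem pick_asset_py_spec : Claim_equal_pick_asset_py := by
  intro assets osv archv _hdom _hpre
  unfold Spec_pick_asset_py
  rw [pv_A2, pv_B2]
  have h := pv_MAIN osv archv assets 0
  revert h
  cases hA : pvAmO (assets.map (fun a => (pvKT osv archv (pvName a), (a, pvName a)))) with
  | none =>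
    cases hB : pvAmK (pvKeyed osv archv 0 assets) with
    | none => intro _; rfl
    | some e => intro h; exact absurd h (by simp [pvRel])
  | some q =>
    cases hB : pvAmK (pvKeyed osv archv 0 assets) with
    | none => intro h; exact absurd h (by simp [pvRel])
    | some e => intro h; simp only [pvRel] at h; simp [h.1]
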